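-- pv_equiv track=rewrite | github.com/cstuartroe/scale-theory | src/midi_utils/emit_midi.py | sequence_with_no_dead_keys
-- ===== SOURCE A (Python) =====
-- from typing import List
--
-- def sequence_from_jumps(jumps: List[int], starting_note: int):
--     seq: List[int] = [starting_note]
--     for jump in jumps:
--         seq.append(seq[-1] + jump)
--     return seq
--
-- DEAD_KEYS = {0, 1, 5, 6, 10, 11, 15, 16, 17, 42, 44, 46, 84, 85, 86, 87, 90, 92, 94, 116, 117, 121, 122, 123}
--
-- def sequence_with_no_dead_keys(jumps, target_starting_note):
--     for i in range(20):
--         seq = sequence_from_jumps(jumps, starting_note=target_starting_note + i)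
--         if all(note not in DEAD_KEYS for note in seq):
--             return seq
--
--         seq = sequence_from_jumps(jumps, starting_note=target_starting_note - i)
--         if all(note not in DEAD_KEYS for note in seq):
--             return seq
--
--     return sequence_from_jumps(jumps, target_starting_note)
-- ===== SOURCE B (Python) =====
-- DEAD_KEYS = {0, 1, 5, 6, 10, 11, 15, 16, 17, 42, 44, 46, 84, 85, 86, 87, 90, 92, 94, 116, 117, 121, 122, 123}
--
-- def sequence_with_no_dead_keys(jumps, target_starting_note):
--     # prefix sums of the jumps, starting at 0
--     prefixes = [0]
--     acc = 0
--     for j in jumps: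
--         acc += j
--         prefixes.append(acc)
--     # start c hits a dead key iff some dead key d has d - c among the prefix sums
--     P = set(prefixes)
--     s = next((c for i in range(20)
--               for c in (target_starting_note + i, target_starting_note - i)
--               if all((d - c) not in P for d in DEAD_KEYS)), target_starting_note)
--     return [s + p for p in prefixes]
-- ===== Notes on version B (the rewrite author's own statement) =====
-- stated objective: alternative
-- what changed: B computes the jump prefix sums once and indexes them in a hash set, so each of the up-to-40 candidate starts is tested with |DEAD_KEYS| set lookups instead of rebuilding and rescanning the whole sequence per candidate as A does.
import Mathlib
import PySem

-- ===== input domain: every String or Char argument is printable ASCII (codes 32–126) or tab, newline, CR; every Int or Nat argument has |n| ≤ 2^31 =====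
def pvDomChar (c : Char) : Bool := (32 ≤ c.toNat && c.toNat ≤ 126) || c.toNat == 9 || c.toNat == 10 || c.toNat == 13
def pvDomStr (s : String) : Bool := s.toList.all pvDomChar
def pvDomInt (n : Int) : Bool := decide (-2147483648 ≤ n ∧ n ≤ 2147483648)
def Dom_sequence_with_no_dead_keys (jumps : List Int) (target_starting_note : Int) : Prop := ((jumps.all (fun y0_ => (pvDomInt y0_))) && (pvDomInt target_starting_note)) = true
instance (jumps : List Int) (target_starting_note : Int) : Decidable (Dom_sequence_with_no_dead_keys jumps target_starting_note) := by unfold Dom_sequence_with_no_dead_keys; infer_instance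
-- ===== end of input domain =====

-- B replaces A's rebuild-and-rescan of the sequence for every candidate start by one prefix-sum pass
-- and a prefix-sum set, each candidate then tested per dead key (objective: alternative decomposition).

-- ===== PORT A =====
def DEAD_KEYS : List Int :=
  [0, 1, 5, 6, 10, 11, 15, 16, 17, 42, 44, 46, 84, 85, 86, 87, 90, 92, 94, 116, 117, 121, 122, 123]

-- seq[-1]: seq always holds at least the starting note, so getLast! is exact here
def sequence_from_jumps (jumps : List Int) (starting_note : Int) : List Int :=
  jumps.foldl (fun seq jump => seq ++ [seq.getLast! + jump]) [starting_note]

-- the 'for i in range(20)' loop with its two candidates per iteration and the final fallback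
def deadLoop (jumps : List Int) (t : Int) (i : Int) : Nat → List Int
  | 0 => sequence_from_jumps jumps t
  | Nat.succ n =>
    let seq := sequence_from_jumps jumps (t + i)
    if seq.all (fun note => !(DEAD_KEYS.contains note)) then seq
    else
      let seq2 := sequence_from_jumps jumps (t - i)
      if seq2.all (fun note => !(DEAD_KEYS.contains note)) then seq2
      else deadLoop jumps t (i + 1) n

def sequence_with_no_dead_keys (jumps : List Int) (target_starting_note : Int) : List Int :=
  deadLoop jumps target_starting_note 0 20

-- ===== PORT B =====
-- the prefix-sum loop of Source B (building forward with a running accumulator)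
def prefixLoop : List Int → Int → List Int
  | [], _ => []
  | j :: rest, acc => (acc + j) :: prefixLoop rest (acc + j)

def sequence_with_no_dead_keys_alt (jumps : List Int) (target_starting_note : Int) : List Int :=
  let prefixes : List Int := 0 :: prefixLoop jumps 0
  let P : PySem.Set Int := PySem.Set.ofList prefixes
  let s := (((PySem.List.pyRange 0 20 1).flatMap
              (fun i => [target_starting_note + i, target_starting_note - i])).find?
              (fun c => DEAD_KEYS.all (fun d => !(PySem.Set.contains P (d - c))))).getD
            target_starting_note
  prefixes.map (fun p => s + p)

-- ===== PRECONDITION & SPEC =====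
def Spec_sequence_with_no_dead_keys (jumps : List Int) (target_starting_note : Int) (out : List Int) : Prop := out = sequence_with_no_dead_keys_alt jumps target_starting_note
instance (jumps : List Int) (target_starting_note : Int) (out : List Int) : Decidable (Spec_sequence_with_no_dead_keys jumps target_starting_note out) := by unfold Spec_sequence_with_no_dead_keys; infer_instance

-- ===== CLAIM (what is proved, stated in full; the proofs are below) =====
def Claim_equal_sequence_with_no_dead_keys : Prop := ∀ (jumps : List Int) (target_starting_note : Int), Dom_sequence_with_no_dead_keys jumps target_starting_note → Spec_sequence_with_no_dead_keys jumps target_starting_note (sequence_with_no_dead_keys jumps target_starting_note)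

-- ===== LEMMAS AND PROOFS =====

-- the candidate test of Source B, as a standalone predicate
def okB (jumps : List Int) (c : Int) : Bool :=
  DEAD_KEYS.all (fun d =>
    !(PySem.Set.contains (PySem.Set.ofList ((0 : Int) :: prefixLoop jumps 0)) (d - c)))

lemma foldl_step_eq (jumps : List Int) : ∀ (pre : List Int) (last : Int),
    jumps.foldl (fun seq jump => seq ++ [seq.getLast! + jump]) (pre ++ [last]) =
      pre ++ last :: prefixLoop jumps last := by
  induction jumps with
  | nil => intro pre last; simp [prefixLoop]
  | cons j rest ih =>
    intro pre last
    have h1 : (pre ++ [last]).getLast! = last := by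
      rw [List.getLast!_eq_getLast?_getD]
      simp [List.getLast?_append]
    have := ih (pre ++ [last]) (last + j)
    simp only [List.foldl_cons, h1, prefixLoop]
    rw [List.append_assoc] at this
    simpa using this

lemma seqFrom_eq (jumps : List Int) (s : Int) :
    sequence_from_jumps jumps s = s :: prefixLoop jumps s := by
  have := foldl_step_eq jumps [] s
  simpa [sequence_from_jumps] using this

lemma prefixLoop_shift (jumps : List Int) : ∀ (a s : Int),
    prefixLoop jumps (s + a) = (prefixLoop jumps a).map (fun p => s + p) := by
  induction jumps with
  | nil => intro a s; simp [prefixLoop]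
  | cons j rest ih =>
    intro a s
    simp only [prefixLoop, List.map_cons, add_assoc]
    exact congrArg _ (ih (a + j) s)

lemma seqFrom_map (jumps : List Int) (s : Int) :
    sequence_from_jumps jumps s = ((0 : Int) :: prefixLoop jumps 0).map (fun p => s + p) := by
  rw [seqFrom_eq]
  have := prefixLoop_shift jumps 0 s
  simp only [List.map_cons]
  rw [add_zero] at this
  simp [this]

lemma ok_bridge (jumps : List Int) (s : Int) :
    (sequence_from_jumps jumps s).all (fun note => !(DEAD_KEYS.contains note)) = okB jumps s := by
  rw [Bool.eq_iff_iff]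
  rw [seqFrom_map]
  simp only [okB, PySem.Set.contains, List.all_map, List.all_eq_true, Function.comp,
    List.contains_eq_mem, Bool.not_eq_eq_eq_not, Bool.not_true, decide_eq_false_iff_not,
    PySem.Set.mem_ofList]
  constructor
  · intro h d hd hmem
    have h2 := h (d - s) hmem
    have hds : s + (d - s) = d := by ring
    rw [hds] at h2; exact h2 hd
  · intro h p hp hmem
    have h2 := h (s + p) hmem
    have hsp : s + p - s = p := by ring
    rw [hsp] at h2; exact h2 hp

lemma loop_eq (jumps : List Int) (t : Int) : ∀ (fuel : Nat) (i : Int),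
    deadLoop jumps t i fuel =
      (match ((PySem.List.pyRange i (i + fuel) 1).flatMap
                (fun k => [t + k, t - k])).find? (okB jumps) with
       | some s => sequence_from_jumps jumps s
       | none => sequence_from_jumps jumps t) := by
  intro fuel
  induction fuel with
  | zero =>
    intro i
    rw [PySem.List.pyRange_one_eq_nil (by simp)]
    simp [deadLoop]
  | succ n ih =>
    intro i
    rw [PySem.List.pyRange_one_cons (by push_cast; omega)]
    simp only [List.flatMap_cons]
    rw [List.find?_append]
    simp only [deadLoop, ok_bridge]
    by_cases h1 : okB jumps (t + i) = true
    · simp [List.find?, h1]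
    · simp only [Bool.not_eq_true] at h1
      by_cases h2 : okB jumps (t - i) = true
      · simp [List.find?, h1, h2]
      · simp only [Bool.not_eq_true] at h2
        have harith : i + 1 + (n : Int) = i + ((n : Nat) + 1 : Nat) := by push_cast; ring
        rw [if_neg (by simp [h1]), if_neg (by simp [h2])]
        rw [ih (i + 1), harith]
        simp [List.find?, h1, h2]

-- ===== VERDICT (by name: the statement is the Claim_ definition above) =====
theorem sequence_with_no_dead_keys_spec : Claim_equal_sequence_with_no_dead_keys := by
  intro jumps t _
  unfold Spec_sequence_with_no_dead_keys
  show sequence_with_no_dead_keys jumps t = sequence_with_no_dead_keys_alt jumps t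
  unfold sequence_with_no_dead_keys
  simp only [sequence_with_no_dead_keys_alt]
  rw [loop_eq jumps t 20 0]
  have h20 : (0 : Int) + (20 : Nat) = 20 := by norm_num
  rw [h20]
  have hok : (fun c => DEAD_KEYS.all (fun d =>
      !(PySem.Set.contains (PySem.Set.ofList ((0 : Int) :: prefixLoop jumps 0)) (d - c)))) =
      okB jumps := by
    funext c; rfl
  rw [hok]
  cases hfind : (((PySem.List.pyRange 0 20 1).flatMap (fun k => [t + k, t - k])).find? (okB jumps)) with
  | none => simp [seqFrom_map]
  | some s => simp [seqFrom_map]
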